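-- pv_equiv track=rewrite | github.com/dmakhervaks/medical-contradictions | process_results.py | get_datasets_by_filtering_thresh
-- ===== SOURCE A (Python) =====
-- def get_datasets_by_filtering_thresh(datasets):
--     filter_thresh_to_dataset = {}
--     for dataset in datasets:
--         thresh = dataset[:dataset.index("_")]
--         if thresh not in filter_thresh_to_dataset:
--             filter_thresh_to_dataset[thresh] = [dataset]
--         else:
--             filter_thresh_to_dataset[thresh].append(dataset)
--
--     return filter_thresh_to_dataset
-- ===== SOURCE B (Python) =====
-- def get_datasets_by_filtering_thresh(datasets):
--     key = lambda d: d[:d.index("_")]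
--     keys = list(dict.fromkeys(key(d) for d in datasets))
--     return {k: [d for d in datasets if key(d) == k] for k in keys}
-- ===== Notes on version B (the rewrite author's own statement) =====
-- stated objective: alternative
-- what changed: B replaces A's single scan that mutates a dict (insert-or-append per element) by a two-pass scheme: dedup the prefix keys in first-occurrence order, then build each group with a filter over the whole list.
import Mathlib
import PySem

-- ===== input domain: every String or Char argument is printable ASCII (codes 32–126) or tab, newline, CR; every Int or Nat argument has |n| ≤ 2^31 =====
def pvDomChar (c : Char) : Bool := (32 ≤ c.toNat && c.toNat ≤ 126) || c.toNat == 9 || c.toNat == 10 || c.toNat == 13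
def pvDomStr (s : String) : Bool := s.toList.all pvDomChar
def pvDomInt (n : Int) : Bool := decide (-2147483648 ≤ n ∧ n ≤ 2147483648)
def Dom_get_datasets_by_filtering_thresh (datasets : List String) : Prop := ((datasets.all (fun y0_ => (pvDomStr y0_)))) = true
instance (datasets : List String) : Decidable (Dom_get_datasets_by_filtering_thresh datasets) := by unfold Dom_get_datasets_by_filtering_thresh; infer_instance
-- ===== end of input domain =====

-- B builds the group dict in two passes (dedup the prefix keys in first-occurrence order,
-- then one filter per key) instead of A's single scan mutating a dict; same return value.

-- ===== PORT A =====
-- thresh = dataset[:dataset.index("_")] ; dataset.index raises ValueError when '_' is absent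
-- (excluded by Pre_), so the slice bound is taken from Str.find (equal to index on Pre_).
def pvThresh (dataset : String) : String :=
  PySem.Str.slice dataset none (some (PySem.Str.find dataset "_"))

def get_datasets_by_filtering_thresh (datasets : List String) : List (String × List String) :=
  (datasets.foldl (fun d dataset =>
      let thresh := pvThresh dataset
      if d.contains thresh then d.modify thresh [] (fun v => v ++ [dataset])
      else d.insert thresh [dataset])
    (PySem.Dict.empty : PySem.Dict String (List String))).items

-- ===== PORT B =====
def get_datasets_by_filtering_thresh_alt (datasets : List String) : List (String × List String) :=
  (PySem.List.dedup (datasets.map pvThresh)).map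
    (fun k => (k, datasets.filter (fun d => pvThresh d == k)))

-- ===== PRECONDITION & SPEC =====
-- Pre_ excludes exactly the inputs where Python A raises ValueError: a dataset without '_'.
def Pre_get_datasets_by_filtering_thresh (datasets : List String) : Prop :=
  ∀ s ∈ datasets, PySem.Str.isIn "_" s = true
instance (datasets : List String) : Decidable (Pre_get_datasets_by_filtering_thresh datasets) := by unfold Pre_get_datasets_by_filtering_thresh; infer_instance

def pvWitness_get_datasets_by_filtering_thresh : List String := ["0.5_mednli", "0.7_mednli", "0.5_snomed"]

def Spec_get_datasets_by_filtering_thresh (datasets : List String) (out : List (String × List String)) : Prop := out = get_datasets_by_filtering_thresh_alt datasets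
instance (datasets : List String) (out : List (String × List String)) : Decidable (Spec_get_datasets_by_filtering_thresh datasets out) := by unfold Spec_get_datasets_by_filtering_thresh; infer_instance

-- ===== CLAIM (what is proved, stated in full; the proofs are below) =====
def Claim_equal_get_datasets_by_filtering_thresh : Prop := ∀ (datasets : List String), Dom_get_datasets_by_filtering_thresh datasets → Pre_get_datasets_by_filtering_thresh datasets → Spec_get_datasets_by_filtering_thresh datasets (get_datasets_by_filtering_thresh datasets)

-- ===== LEMMAS AND PROOFS =====

-- Both branches of A's loop body are the same dict update (Python's d[k] = f(d.get(k, dflt))).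
theorem pv_step_eq (d : PySem.Dict String (List String)) (x : String) :
    (if d.contains (pvThresh x) then d.modify (pvThresh x) [] (fun v => v ++ [x])
     else d.insert (pvThresh x) [x])
      = d.modify (pvThresh x) [] (fun v => v ++ [x]) := by
  by_cases h : d.contains (pvThresh x) = true
  · simp [h]
  · simp only [Bool.not_eq_true] at h
    simp [h, PySem.Dict.modify, PySem.Dict.getD_of_not_contains d [] h]

theorem pv_dedup_eq (xs : List String) :
    PySem.Set.update ([] : PySem.Set String) xs = PySem.List.dedup xs := rfl

theorem get_datasets_eq (datasets : List String) :
    get_datasets_by_filtering_thresh datasets = get_datasets_by_filtering_thresh_alt datasets := by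
  unfold get_datasets_by_filtering_thresh get_datasets_by_filtering_thresh_alt
  have hstep :
      datasets.foldl (fun d dataset =>
          let thresh := pvThresh dataset
          if d.contains thresh then d.modify thresh [] (fun v => v ++ [dataset])
          else d.insert thresh [dataset])
        (PySem.Dict.empty : PySem.Dict String (List String))
      = datasets.foldl (fun d x => d.modify (pvThresh x) [] (fun v => v ++ [x]))
        PySem.Dict.empty := by
    exact PySem.List.foldl_congr_mem _ _ _ _ (fun d x _ => pv_step_eq d x)
  rw [hstep]
  set D := datasets.foldl (fun d x => d.modify (pvThresh x) [] (fun v => v ++ [x]))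
      (PySem.Dict.empty : PySem.Dict String (List String)) with hD
  have hnodup : D.keys.Nodup := by
    rw [hD]
    exact PySem.Dict.nodup_keys_foldl_modify_key datasets pvThresh [] (fun _ x v => v ++ [x]) _
      (by simp [PySem.Dict.keys_empty])
  have hkeys : D.keys = PySem.List.dedup (datasets.map pvThresh) := by
    rw [hD, PySem.Dict.keys_foldl_modify_key datasets pvThresh [] (fun _ x v => v ++ [x]),
      PySem.Dict.keys_empty]
    exact pv_dedup_eq _
  have hgetD : ∀ c, D.getD c [] = datasets.filter (fun d => pvThresh d == c) := by
    intro c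
    have hmap : datasets.foldl (fun d x => d.modify (pvThresh x) [] (fun v => v ++ [x]))
        (PySem.Dict.empty : PySem.Dict String (List String))
        = (datasets.map (fun x => (pvThresh x, x))).foldl
            (fun d p => d.modify p.1 [] (fun v => v ++ [p.2])) PySem.Dict.empty := by
      rw [List.foldl_map]
    rw [hD, hmap, PySem.Dict.getD_foldl_modify_append, PySem.Dict.getD_empty]
    simp [List.filter_map, Function.comp_def]
  rw [PySem.Dict.items_eq_map_keys D hnodup [], hkeys]
  exact List.map_congr_left (fun k _ => by rw [hgetD k])

-- ===== VERDICT (by name: the statement is the Claim_ definition above) =====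
theorem get_datasets_by_filtering_thresh_spec : Claim_equal_get_datasets_by_filtering_thresh := by
  intro datasets _ _
  unfold Spec_get_datasets_by_filtering_thresh
  exact get_datasets_eq datasets
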